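-- pv_equiv track=rewrite | github.com/94briel/segundaPracticaLenguajes | automataPractica.py | accepts_const
-- ===== SOURCE A (Python) =====
-- def accepts_const(s):
--     state = 'C0'
--     accepting = {'C2', 'C3', 'C7', 'C13', 'C14', 'C15'}
--     for c in s:
--         transitions = {
--             'C0': {c.isnumeric(): 'C2', '.': 'C8', '+': 'C1', '-': 'C1', '"': 'C12', "'": 'C11'},
--             'C1': {c.isnumeric(): 'C2', '.': 'C8'},
--             'C2': {c.isnumeric(): 'C2', '.': 'C3'},
--             'C3': {c.isnumeric(): 'C3'},
--             'C6': {c.isnumeric(): 'C7'},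
--             'C7': {c.isnumeric(): 'C7'},
--             'C8': {c.isnumeric(): 'C3'},
--             'C11': {c.isnumeric(): 'C14', '.': 'C14', '+': 'C14', '-': 'C14', "'": 'C15', c.isalpha(): 'C14',
--                     not c.isalnum() and c != "'": 'C14'},
--             'C12': {c.isnumeric(): 'C12', '.': 'C12', '+': 'C12', '-': 'C12', '"': 'C13', c.isalpha(): 'C12',
--                     not c.isalnum() and c != '"': 'C12'},
--             'C13': {},
--             'C14': {"'": 'C15'},
--             'C15': {}
--         }
--         if True in transitions[state].keys():
--             state = transitions[state][True]
--         else: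
--             state = transitions[state][c] if c in transitions[state].keys() else None
--             if state is None:
--                 break
--         transitions.clear()
--     return state in accepting
-- ===== SOURCE B (Python) =====
-- def accepts_const(s):
--     if not s:
--         return False
--     c0 = s[0]
--     if c0 == '"':
--         return len(s) >= 2 and s[-1] == '"' and '"' not in s[1:-1]
--     if c0 == "'":
--         body = s[1:]
--         if len(body) == 1:
--             return True
--         if len(body) == 2:
--             return body[0] != "'" and body[1] == "'"
--         return False
--     rest = s[1:] if c0 in '+-' else s
--     if '.' in rest:
--         i = rest.index('.')
--         digits = rest[:i] + rest[i+1:]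
--     else:
--         digits = rest
--     return bool(digits) and all(ch.isnumeric() for ch in digits)
-- ===== Notes on version B (the rewrite author's own statement) =====
-- stated objective: simpler
-- what changed: Replaced the per-character transition-table DFA loop (which rebuilds a dict of dicts for every character) by a single branch on s[0] with a small bespoke pass per token kind: a split-at-the-dot digit check for numbers, a last-quote/no-inner-quote check for double-quoted strings, and a length-based check for single-quoted ones.
import Mathlib
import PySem

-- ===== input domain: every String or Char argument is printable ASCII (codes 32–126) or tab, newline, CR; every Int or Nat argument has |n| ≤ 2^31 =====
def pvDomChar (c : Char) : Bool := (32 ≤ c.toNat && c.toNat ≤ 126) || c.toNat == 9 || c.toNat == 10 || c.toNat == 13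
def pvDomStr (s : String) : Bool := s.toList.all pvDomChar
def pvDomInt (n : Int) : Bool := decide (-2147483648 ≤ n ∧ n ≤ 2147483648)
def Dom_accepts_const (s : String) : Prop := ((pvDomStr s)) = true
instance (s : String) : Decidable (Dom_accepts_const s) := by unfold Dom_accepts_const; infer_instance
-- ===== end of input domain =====

-- B replaces A's per-character transition-table DFA loop by one branch on s[0] with a small
-- bespoke pass per token kind (number / double-quoted / single-quoted); objective: simpler.

-- c.isnumeric(): equals isdigit on the ASCII domain the claim covers (shared char predicate)
def pyNum (c : Char) : Bool := PySem.Chars.isdigit c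

-- ===== PORT A =====
-- one step of A's loop: the dict literal collapses (later duplicate bool keys overwrite earlier
-- ones; here every true-valued bool key of a state maps to the same target), so 'True in keys'
-- becomes the disjunction of the state's bool-key conditions, then the string-key lookup on c.
def stepA (st : String) (c : Char) : Option String :=
  match st with
  | "C0" =>
      if pyNum c then some "C2"
      else if c = '.' then some "C8"
      else if c = '+' then some "C1"
      else if c = '-' then some "C1"
      else if c = '"' then some "C12"
      else if c = '\'' then some "C11"
      else none
  | "C1" => if pyNum c then some "C2" else if c = '.' then some "C8" else none
  | "C2" => if pyNum c then some "C2" else if c = '.' then some "C3" else none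
  | "C3" => if pyNum c then some "C3" else none
  | "C6" => if pyNum c then some "C7" else none
  | "C7" => if pyNum c then some "C7" else none
  | "C8" => if pyNum c then some "C3" else none
  | "C11" =>
      if pyNum c || PySem.Chars.isalpha c || (!(PySem.Chars.isalnum c) && c ≠ '\'') then some "C14"
      else if c = '.' then some "C14"
      else if c = '+' then some "C14"
      else if c = '-' then some "C14"
      else if c = '\'' then some "C15"
      else none
  | "C12" =>
      if pyNum c || PySem.Chars.isalpha c || (!(PySem.Chars.isalnum c) && c ≠ '"') then some "C12"
      else if c = '.' then some "C12"
      else if c = '+' then some "C12"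
      else if c = '-' then some "C12"
      else if c = '"' then some "C13"
      else none
  | "C13" => none
  | "C14" => if c = '\'' then some "C15" else none
  | "C15" => none
  | _ => none

-- the loop: state = None ('break') is absorbing, exactly as in the Python
def runA (os : Option String) (l : List Char) : Option String :=
  l.foldl (fun os c => os.bind (fun st => stepA st c)) os

def accepts_const (s : String) : Bool :=
  match runA (some "C0") s.toList with
  | some st => ["C2", "C3", "C7", "C13", "C14", "C15"].contains st
  | none => false

-- ===== PORT B =====
-- Source B's number tail: digits = rest with the first '.' removed (if any); nonempty and all numeric
def numPass (rest : List Char) : Bool :=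
  match PySem.List.index? rest '.' with
  | some i =>
      !((rest.take i ++ rest.drop (i + 1)).isEmpty) && (rest.take i ++ rest.drop (i + 1)).all pyNum
  | none => !rest.isEmpty && rest.all pyNum

-- Source B's body on the character list (s[0] = c0, s[1:] = body, s = c0 :: body)
def altB : List Char → Bool
  | [] => false                                   -- if not s: return False
  | c0 :: body =>
    if c0 = '"' then
      -- len(s) >= 2 and s[-1] == '"' and '"' not in s[1:-1]
      decide (2 ≤ (c0 :: body).length) && (PySem.List.pyGet? (c0 :: body) (-1) == some '"') &&
        !((PySem.List.slice (c0 :: body) (some 1) (some (-1))).contains '"')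
    else if c0 = '\'' then
      if body.length == 1 then true
      else if body.length == 2 then
        (!(PySem.List.pyGet? body 0 == some '\'')) && (PySem.List.pyGet? body 1 == some '\'')
      else false
    else
      -- rest = s[1:] if c0 in '+-' else s
      numPass (if c0 = '+' || c0 = '-' then body else (c0 :: body))

def accepts_const_alt (s : String) : Bool := altB s.toList

-- ===== PRECONDITION & SPEC =====
def Spec_accepts_const (s : String) (out : Bool) : Prop := out = accepts_const_alt s
instance (s : String) (out : Bool) : Decidable (Spec_accepts_const s out) := by unfold Spec_accepts_const; infer_instance

-- ===== CLAIM (what is proved, stated in full; the proofs are below) =====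
def Claim_equal_accepts_const : Prop := ∀ (s : String), Dom_accepts_const s → Spec_accepts_const s (accepts_const s)

-- ===== LEMMAS AND PROOFS =====

theorem runA_none (l : List Char) : runA none l = none := by
  induction l with
  | nil => rfl
  | cons c t ih => simpa [runA, List.foldl] using ih

theorem runA_cons (st : String) (c : Char) (t : List Char) :
    runA (some st) (c :: t) = runA (stepA st c) t := by
  simp [runA, List.foldl]

-- acceptance of A's loop started in state st
def accFrom (st : String) (l : List Char) : Bool :=
  match runA (some st) l with
  | some st' => ["C2", "C3", "C7", "C13", "C14", "C15"].contains st'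
  | none => false

theorem accFrom_none (st : String) (c : Char) (t : List Char) (h : stepA st c = none) :
    accFrom st (c :: t) = false := by
  simp [accFrom, runA_cons, h, runA_none]

theorem accFrom_step (st st' : String) (c : Char) (t : List Char) (h : stepA st c = some st') :
    accFrom st (c :: t) = accFrom st' t := by
  simp [accFrom, runA_cons, h]

theorem acc3 (l : List Char) : accFrom "C3" l = l.all pyNum := by
  induction l with
  | nil => rfl
  | cons c t ih =>
    by_cases h : pyNum c = true
    · rw [accFrom_step "C3" "C3" c t (by simp [stepA, h]), ih]; simp [h]
    · rw [accFrom_none "C3" c t (by simp [stepA, h])]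
      simp [List.all_cons, Bool.eq_false_iff.mpr h]

theorem acc8 (l : List Char) : accFrom "C8" l = (!l.isEmpty && l.all pyNum) := by
  cases l with
  | nil => rfl
  | cons c t =>
    by_cases h : pyNum c = true
    · rw [accFrom_step "C8" "C3" c t (by simp [stepA, h]), acc3]; simp [h]
    · rw [accFrom_none "C8" c t (by simp [stepA, h])]
      simp [List.all_cons, Bool.eq_false_iff.mpr h]

theorem acc15 (l : List Char) : accFrom "C15" l = l.isEmpty := by
  cases l with
  | nil => rfl
  | cons c t => rw [accFrom_none "C15" c t rfl]; rfl

theorem acc13 (l : List Char) : accFrom "C13" l = l.isEmpty := by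
  cases l with
  | nil => rfl
  | cons c t => rw [accFrom_none "C13" c t rfl]; rfl

theorem acc14 (l : List Char) : accFrom "C14" l = (l.isEmpty || decide (l = ['\''])) := by
  cases l with
  | nil => rfl
  | cons c t =>
    by_cases h : c = '\''
    · subst h
      rw [accFrom_step "C14" "C15" '\'' t (by decide), acc15]
      cases t <;> simp
    · rw [accFrom_none "C14" c t (by simp [stepA, h])]
      simp [h]

-- index? on a cons cell
theorem index?_cons (c v : Char) (t : List Char) :
    PySem.List.index? (c :: t) v =
      if c = v then some 0 else (PySem.List.index? t v).map (· + 1) := by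
  by_cases h : c = v
  · simp [PySem.List.index?, List.idxOf?, List.findIdx?_cons, h]
  · simp [PySem.List.index?, List.idxOf?, List.findIdx?_cons, h, beq_false_of_ne h]

-- the numeric-tail characterisation of A's state C2 against B's index?/take/drop pass
theorem acc2 (l : List Char) :
    accFrom "C2" l =
      (match PySem.List.index? l '.' with
       | some i => ((l.take i ++ l.drop (i + 1)).all pyNum)
       | none => l.all pyNum) := by
  induction l with
  | nil => rfl
  | cons c t ih =>
    by_cases hn : pyNum c = true
    · have hdot : ¬ c = '.' := by intro h; subst h; simp [pyNum, PySem.Chars.isdigit] at hn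
      rw [accFrom_step "C2" "C2" c t (by simp [stepA, hn]), ih, index?_cons, if_neg hdot]
      cases h : PySem.List.index? t '.' with
      | none => simp [hn]
      | some i => simp [hn, List.take_succ_cons, List.drop_succ_cons]
    · by_cases hdot : c = '.'
      · subst hdot
        rw [accFrom_step "C2" "C3" '.' t (by decide), acc3, index?_cons]
        simp
      · rw [accFrom_none "C2" c t (by simp [stepA, hn, hdot]), index?_cons, if_neg hdot]
        cases h : PySem.List.index? t '.' with
        | none => simp [List.all_cons, Bool.eq_false_iff.mpr hn]
        | some i => simp [List.take_succ_cons, List.all_cons, Bool.eq_false_iff.mpr hn]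

-- A's state C1 (after a sign) against B's number pass on the remaining characters
theorem acc1 (r : List Char) : accFrom "C1" r = numPass r := by
  unfold numPass
  cases r with
  | nil => rfl
  | cons d u =>
    by_cases hn : pyNum d = true
    · have hdot : ¬ d = '.' := by intro h; subst h; simp [pyNum, PySem.Chars.isdigit] at hn
      rw [accFrom_step "C1" "C2" d u (by simp [stepA, hn]), acc2, index?_cons, if_neg hdot]
      cases h : PySem.List.index? u '.' with
      | none => simp [hn]
      | some i => simp [hn, List.take_succ_cons, List.drop_succ_cons]
    · by_cases hdot : d = '.'
      · subst hdot
        rw [accFrom_step "C1" "C8" '.' u (by decide), acc8, index?_cons]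
        simp
      · rw [accFrom_none "C1" d u (by simp [stepA, hn, hdot]), index?_cons, if_neg hdot]
        cases h : PySem.List.index? u '.' with
        | none => simp [List.all_cons, Bool.eq_false_iff.mpr hn]
        | some i => simp [List.take_succ_cons, List.all_cons, Bool.eq_false_iff.mpr hn]

-- A's run from C0 on a non-sign, non-quote first character against B's number pass
theorem numBranch (c : Char) (t : List Char)
    (hq1 : ¬ c = '"') (hq2 : ¬ c = '\'') (hp : ¬ c = '+') (hm : ¬ c = '-') :
    accFrom "C0" (c :: t) = numPass (c :: t) := by
  unfold numPass
  by_cases hn : pyNum c = true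
  · have hdot : ¬ c = '.' := by intro h; subst h; simp [pyNum, PySem.Chars.isdigit] at hn
    rw [accFrom_step "C0" "C2" c t (by simp [stepA, hn]), acc2, index?_cons, if_neg hdot]
    cases h : PySem.List.index? t '.' with
    | none => simp [hn]
    | some i => simp [hn, List.take_succ_cons, List.drop_succ_cons]
  · by_cases hdot : c = '.'
    · subst hdot
      rw [accFrom_step "C0" "C8" '.' t (by decide), acc8, index?_cons]
      simp
    · rw [accFrom_none "C0" c t (by simp [stepA, hn, hdot, hq1, hq2, hp, hm]),
        index?_cons, if_neg hdot]
      cases h : PySem.List.index? t '.' with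
      | none => simp [List.all_cons, Bool.eq_false_iff.mpr hn]
      | some i => simp [List.take_succ_cons, List.all_cons, Bool.eq_false_iff.mpr hn]

-- from C12 any character other than '"' loops back to C12 (the bool keys cover everything else)
theorem stepA_C12 (c : Char) (h : ¬ c = '"') : stepA "C12" c = some "C12" := by
  by_cases ha : PySem.Chars.isalnum c = true
  · rcases Bool.or_eq_true_iff.mp (by simpa [PySem.Chars.isalnum] using ha) with h' | h' <;>
      simp [stepA, pyNum, h']
  · simp only [Bool.not_eq_true, PySem.Chars.isalnum, Bool.or_eq_false_iff] at ha
    simp [stepA, pyNum, PySem.Chars.isalnum, ha.1, ha.2, h]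

theorem acc12 (l : List Char) :
    accFrom "C12" l = (!l.isEmpty && (l.getLast? == some '"') && !(l.dropLast.contains '"')) := by
  induction l with
  | nil => rfl
  | cons c t ih =>
    by_cases h : c = '"'
    · subst h
      rw [accFrom_step "C12" "C13" '"' t (by decide), acc13]
      cases t with
      | nil => simp
      | cons d u => simp [List.dropLast_cons_of_ne_nil]
    · rw [accFrom_step "C12" "C12" c t (stepA_C12 c h), ih]
      cases t with
      | nil => simp [h]
      | cons d u =>
        have h' : ('"' : Char) ≠ c := Ne.symm h
        simp [List.getLast?_cons_cons, List.dropLast_cons_of_ne_nil, h']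

-- from C11 any character other than '\'' goes to C14
theorem stepA_C11 (c : Char) (h : ¬ c = '\'') : stepA "C11" c = some "C14" := by
  by_cases ha : PySem.Chars.isalnum c = true
  · rcases Bool.or_eq_true_iff.mp (by simpa [PySem.Chars.isalnum] using ha) with h' | h' <;>
      simp [stepA, pyNum, h']
  · simp only [Bool.not_eq_true, PySem.Chars.isalnum, Bool.or_eq_false_iff] at ha
    simp [stepA, pyNum, PySem.Chars.isalnum, ha.1, ha.2, h]

theorem acc11 (l : List Char) :
    accFrom "C11" l =
      (if l.length == 1 then true
       else if l.length == 2 then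
         (!(PySem.List.pyGet? l 0 == some '\'')) && (PySem.List.pyGet? l 1 == some '\'')
       else false) := by
  match l with
  | [] => rfl
  | [c] =>
    by_cases h : c = '\''
    · subst h; rw [accFrom_step "C11" "C15" '\'' [] (by decide), acc15]; rfl
    · rw [accFrom_step "C11" "C14" c [] (stepA_C11 c h), acc14]; rfl
  | c :: d :: u =>
    by_cases h : c = '\''
    · subst h
      rw [accFrom_step "C11" "C15" '\'' (d :: u) (by decide), acc15]
      cases u <;> simp [PySem.List.pyGet?, PySem.List.pyIdx?]
    · rw [accFrom_step "C11" "C14" c (d :: u) (stepA_C11 c h), acc14]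
      cases u with
      | nil =>
        simp [PySem.List.pyGet?, PySem.List.pyIdx?, beq_false_of_ne h]
        by_cases hd : d = '\''
        · simp [hd]
        · simp [hd, beq_false_of_ne hd]
      | cons e v => simp

-- s[1:-1] on a cons cell
theorem slice_one_neg_one (c : Char) (t : List Char) :
    PySem.List.slice (c :: t) (some 1) (some (-1)) = t.dropLast := by
  cases t with
  | nil => rfl
  | cons d u => simp [PySem.List.slice, List.dropLast_eq_take]

-- ===== VERDICT (by name: the statement is the Claim_ definition above) =====
theorem accepts_const_spec : Claim_equal_accepts_const := by
  intro s _
  unfold Spec_accepts_const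
  have hA : accepts_const s = accFrom "C0" s.toList := rfl
  have hB : accepts_const_alt s = altB s.toList := rfl
  rw [hA, hB]
  cases hl : s.toList with
  | nil => simp [accFrom, runA, altB]
  | cons c t =>
    by_cases hq1 : c = '"'
    · subst hq1
      rw [accFrom_step "C0" "C12" '"' t (by decide), acc12]
      simp [altB, slice_one_neg_one, PySem.List.pyGet?_neg_one]
      cases t with
      | nil => simp
      | cons d u => simp [List.getLast?_cons_cons]
    · by_cases hq2 : c = '\''
      · subst hq2
        rw [accFrom_step "C0" "C11" '\'' t (by decide), acc11]
        simp [altB]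
      · by_cases hp : c = '+'
        · subst hp
          rw [accFrom_step "C0" "C1" '+' t (by decide), acc1]
          simp [altB]
        · by_cases hm : c = '-'
          · subst hm
            rw [accFrom_step "C0" "C1" '-' t (by decide), acc1]
            simp [altB]
          · rw [numBranch c t hq1 hq2 hp hm]
            simp [altB, hq1, hq2, hp, hm]
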